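-- pv_equiv track=rewrite | github.com/bcranteverfi/tableau-scripts | utils/tableau_object_helpers.py | build_repo_paths
-- ===== SOURCE A (Python) =====
-- from collections import defaultdict, deque
--
-- def build_repo_paths(depth_list=None, pairs=None):
--     repo_paths = list()
--
--     def get_all_parents(child_node, parent_deque):
--         parent_deque.appendleft(child_node)
--         if pairs.get(child_node) is not None:
--             get_all_parents(pairs.get(child_node), parent_deque)
--         else:
--             return repo_paths.append(list(parent_deque))
--
--     for idx in range(0, len(depth_list)):
--         for child in depth_list[idx]:
--             parent_tree = deque()
--             get_all_parents(child, parent_tree)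
--
--     return repo_paths
-- ===== SOURCE B (Python) =====
-- def build_repo_paths(depth_list=None, pairs=None):
--     repo_paths = []
--     for group in depth_list:
--         for child in group:
--             path = [child]
--             node = pairs.get(child)
--             while node is not None:
--                 path.append(node)
--                 node = pairs.get(node)
--             path.reverse()
--             repo_paths.append(path)
--     return repo_paths
-- ===== Notes on version B (the rewrite author's own statement) =====
-- stated objective: idiomatic
-- what changed: Replaces the recursive closure that prepends into a deque and appends to an enclosing list with a plain iterative while-loop per child that collects the parent chain forward and reverses it.
import Mathlib
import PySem

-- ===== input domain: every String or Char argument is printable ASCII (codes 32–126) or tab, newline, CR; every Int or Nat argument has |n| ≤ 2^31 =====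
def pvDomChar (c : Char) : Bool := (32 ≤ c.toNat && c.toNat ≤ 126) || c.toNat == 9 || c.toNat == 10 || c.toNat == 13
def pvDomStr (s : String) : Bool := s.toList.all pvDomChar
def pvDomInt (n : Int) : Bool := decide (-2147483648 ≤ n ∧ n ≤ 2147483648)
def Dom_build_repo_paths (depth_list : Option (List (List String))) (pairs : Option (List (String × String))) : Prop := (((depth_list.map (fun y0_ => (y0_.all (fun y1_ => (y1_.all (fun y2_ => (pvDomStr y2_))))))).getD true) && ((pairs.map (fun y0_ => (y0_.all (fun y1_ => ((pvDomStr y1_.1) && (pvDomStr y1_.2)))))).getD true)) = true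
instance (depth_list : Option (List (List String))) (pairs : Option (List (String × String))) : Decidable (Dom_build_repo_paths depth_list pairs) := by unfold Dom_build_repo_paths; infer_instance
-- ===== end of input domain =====

-- B replaces A's recursive closure + deque with a per-child iterative while-loop (collect forward, then reverse); same cost, plainer code.

-- shared: the parent dict built from the `pairs` argument (empty when pairs is None — reachable only with no children, see Pre_)
def pvParentDict (pairs : Option (List (String × String))) : PySem.Dict String String :=
  PySem.Dict.ofList (pairs.getD [])

-- fuel bound: a terminating parent chain visits each key at most once, so length+1 steps suffice
def pvFuel (pairs : Option (List (String × String))) : Nat := (pairs.getD []).length + 1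

-- ===== PORT A =====
-- A's recursive helper get_all_parents: prepends child to the deque, recurses on the parent if any,
-- otherwise appends the deque to repo_paths. Fuel makes it structural; under Pre_ the fuel never runs out.
def paGetAllParents (d : PySem.Dict String String) : Nat → String → List String → List (List String) → List (List String)
  | 0, _, _, repo => repo
  | fuel + 1, child, dq, repo =>
    let dq := child :: dq
    match d.get? child with
    | some p => paGetAllParents d fuel p dq repo
    | none => repo ++ [dq]

def build_repo_paths (depth_list : Option (List (List String))) (pairs : Option (List (String × String))) : List (List String) :=
  let dl := depth_list.getD []
  let d := pvParentDict pairs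
  (PySem.List.pyRange 0 (PySem.List.len dl) 1).foldl
    (fun repo idx =>
      (PySem.List.pyGetD dl idx []).foldl
        (fun repo child => paGetAllParents d (pvFuel pairs) child [] repo) repo) []

-- ===== PORT B =====
-- B's while-loop: node = pairs.get(child); while node is not None: path.append(node); node = pairs.get(node)
def pbChain (d : PySem.Dict String String) : Nat → Option String → List String → List String
  | _, none, path => path
  | 0, some _, path => path
  | fuel + 1, some n, path => pbChain d fuel (d.get? n) (path ++ [n])

def build_repo_paths_alt (depth_list : Option (List (List String))) (pairs : Option (List (String × String))) : List (List String) :=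
  let d := pvParentDict pairs
  (depth_list.getD []).foldl
    (fun repo group =>
      group.foldl
        (fun repo child => repo ++ [(pbChain d (pvFuel pairs) (d.get? child) [child]).reverse]) repo) []

-- ===== PRECONDITION & SPEC =====
-- Pre_ excludes exactly the inputs where Python A raises (or recurses forever): depth_list=None (TypeError),
-- pairs=None while some child exists (AttributeError), and parent chains that never reach a root (cycle:
-- RecursionError); the iterate condition says each child's parent chain escapes the dict within len(pairs)+1 steps.
def Pre_build_repo_paths (depth_list : Option (List (List String))) (pairs : Option (List (String × String))) : Prop :=
  depth_list ≠ none ∧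
  ((∃ group ∈ depth_list.getD [], group ≠ []) → pairs ≠ none) ∧
  ∀ group ∈ depth_list.getD [], ∀ child ∈ group,
    (fun o => o.bind (pvParentDict pairs).get?)^[pvFuel pairs] (some child) = none
instance (depth_list : Option (List (List String))) (pairs : Option (List (String × String))) : Decidable (Pre_build_repo_paths depth_list pairs) := by unfold Pre_build_repo_paths; infer_instance

def pvWitness_build_repo_paths : Option (List (List String)) × (Option (List (String × String))) :=
  (some [["a", "b"], ["c"]], some [("b", "a"), ("c", "b")])

def Spec_build_repo_paths (depth_list : Option (List (List String))) (pairs : Option (List (String × String))) (out : List (List String)) : Prop := out = build_repo_paths_alt depth_list pairs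
instance (depth_list : Option (List (List String))) (pairs : Option (List (String × String))) (out : List (List String)) : Decidable (Spec_build_repo_paths depth_list pairs out) := by unfold Spec_build_repo_paths; infer_instance

-- ===== CLAIM (what is proved, stated in full; the proofs are below) =====
def Claim_equal_build_repo_paths : Prop := ∀ (depth_list : Option (List (List String))) (pairs : Option (List (String × String))), Dom_build_repo_paths depth_list pairs → Pre_build_repo_paths depth_list pairs → Spec_build_repo_paths depth_list pairs (build_repo_paths depth_list pairs)

-- ===== LEMMAS AND PROOFS =====

-- termination within `fuel` steps, phrased structurally (equivalent to the iterate form in Pre_)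
def pvTerm (d : PySem.Dict String String) : Nat → String → Prop
  | 0, _ => False
  | fuel + 1, c =>
    match d.get? c with
    | none => True
    | some p => pvTerm d fuel p

theorem pv_iter_none_fixed (d : PySem.Dict String String) (n : Nat) :
    (fun o => o.bind d.get?)^[n] none = none := by
  induction n with
  | zero => rfl
  | succ n ih => rw [Function.iterate_succ_apply]; exact ih

theorem pv_iter_eq_term (d : PySem.Dict String String) (n : Nat) (c : String) :
    (fun o => o.bind d.get?)^[n] (some c) = none ↔ pvTerm d n c := by
  induction n generalizing c with
  | zero => simp [pvTerm]
  | succ n ih =>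
    rw [Function.iterate_succ_apply]
    show (fun o => o.bind d.get?)^[n] (d.get? c) = none ↔ _
    cases h : d.get? c with
    | none => simp [pvTerm, h, pv_iter_none_fixed]
    | some p => simp [pvTerm, h, ih]

theorem pbChain_append (d : PySem.Dict String String) :
    ∀ (fuel : Nat) (o : Option String) (p q : List String),
      pbChain d fuel o (p ++ q) = p ++ pbChain d fuel o q := by
  intro fuel
  induction fuel with
  | zero => intro o p q; cases o <;> rfl
  | succ fuel ih =>
    intro o p q
    cases o with
    | none => rfl
    | some n =>
      show pbChain d fuel (d.get? n) ((p ++ q) ++ [n]) = p ++ pbChain d fuel (d.get? n) (q ++ [n])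
      rw [List.append_assoc, ih]

-- per-child: A's recursive helper appends exactly B's reversed chain
theorem pv_child_eq (d : PySem.Dict String String) (fuel : Nat) :
    ∀ (c : String) (dq : List String) (repo : List (List String)), pvTerm d fuel c →
      paGetAllParents d fuel c dq repo = repo ++ [(pbChain d fuel (d.get? c) [c]).reverse ++ dq] := by
  induction fuel with
  | zero => intro c dq repo h; exact absurd h (by simp [pvTerm])
  | succ fuel ih =>
    intro c dq repo h
    unfold paGetAllParents
    cases hc : d.get? c with
    | none =>
      show repo ++ [c :: dq] = _
      simp [pbChain, hc]
    | some p =>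
      show paGetAllParents d fuel p (c :: dq) repo = repo ++ [(pbChain d (fuel + 1) (some p) [c]).reverse ++ dq]
      have hterm : pvTerm d fuel p := by
        have := h; unfold pvTerm at this; rw [hc] at this; exact this
      rw [ih p (c :: dq) repo hterm]
      show _ = repo ++ [(pbChain d fuel (d.get? p) ([c] ++ [p])).reverse ++ dq]
      rw [pbChain_append]
      simp

theorem build_repo_paths_spec : Claim_equal_build_repo_paths := by
  intro depth_list pairs _hdom hpre
  unfold Spec_build_repo_paths build_repo_paths build_repo_paths_alt
  simp only []
  rw [PySem.List.foldl_pyRange_zero_pyGetD]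
  apply PySem.List.foldl_congr_mem' (h := ?_)
  intro group hg repo
  apply PySem.List.foldl_congr_mem' (h := ?_)
  intro child hc repo'
  have hterm : pvTerm (pvParentDict pairs) (pvFuel pairs) child := by
    rw [← pv_iter_eq_term]
    exact hpre.2.2 group hg child hc
  rw [pv_child_eq _ _ child [] repo' hterm]
  simp
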